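-- pv_equiv track=rewrite | github.com/rijulm/Playlist-Data-Generator | test.py | solution
-- ===== SOURCE A (Python) =====
-- def solution(S):
--     # write your code in Python 3.6
--
--     def unbalanced_check(S):
--         # first we can check for it being unbalanced
--         temp = "".join(set(S))
--
--         lower = ['a', 'b', 'c', 'd', 'e', 'f', 'g', 'h', 'i', 'j', 'k', 'l', 'm', 'n', 'o', 'p', 'q', 'r', 's', 't', 'u', 'v', 'w', 'x', 'y', 'z']
--         upper = ['A', 'B', 'C', 'D', 'E', 'F', 'G', 'H', 'I', 'J', 'K', 'L', 'M', 'N', 'O', 'P', 'Q', 'R', 'S', 'T', 'U', 'V', 'W', 'X', 'Y', 'Z']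
--
--
--         for letter in lower:
--             if letter in temp:
--                 pos = lower.index(letter)
--                 if upper[pos] in temp:
--                     temp = temp.replace(upper[pos], '')
--                     temp = temp.replace(letter, '')
--
--         # if the leftover length after eliminating the pairs is not 0, there was something leftover that did not have a pair
--         # this must make it unbalanced
--         if len(temp) != 0:
--             return -1
--         else:
--             return 1
--
--
--     # now that we know the string is balanced
--     smallest = len(S)+1
--     # a very heavily brute force way to do this is check every possible substring
--     # then if it is not unbalanced, compare its length to the current smallest and replace if smaller
--     # once every substring is checked, we will have a smallest value
--
--     substrings = [S[i: j] for i in range(len(S)) for j in range(i + 1, len(S) + 1)]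
--
--     for el in substrings:
--         if unbalanced_check(el) == 1:
--             if len(el) < smallest:
--                 smallest = len(el)
--
--     if smallest == len(S)+1:
--         return -1
--     else:
--         return smallest
-- ===== SOURCE B (Python) =====
-- def solution(S):
--     # One pass per start index: grow the window to the right, maintaining the set
--     # of lowercase letters seen (uppercased) and the set of uppercase letters seen;
--     # a window is balanced iff it contains only letters and the two sets are equal.
--     n = len(S)
--     smallest = n + 1
--     for i in range(n):
--         lo = set()
--         up = set()
--         ok = True
--         L = 0
--         for c in S[i:]:
--             L += 1
--             if 'a' <= c <= 'z':
--                 lo.add(c.upper())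
--             elif 'A' <= c <= 'Z':
--                 up.add(c)
--             else:
--                 ok = False
--             if ok and lo == up and L < smallest:
--                 smallest = L
--     return -1 if smallest == n + 1 else smallest
-- ===== Notes on version B (the rewrite author's own statement) =====
-- stated objective: faster
-- what changed: A materialises every substring and re-checks balance from scratch with a 26-letter set-elimination pass per substring; B scans rightward from each start index once, maintaining the set of lowercase letters seen (uppercased) and the set of uppercase letters seen incrementally and comparing them at each step.
import Mathlib
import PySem

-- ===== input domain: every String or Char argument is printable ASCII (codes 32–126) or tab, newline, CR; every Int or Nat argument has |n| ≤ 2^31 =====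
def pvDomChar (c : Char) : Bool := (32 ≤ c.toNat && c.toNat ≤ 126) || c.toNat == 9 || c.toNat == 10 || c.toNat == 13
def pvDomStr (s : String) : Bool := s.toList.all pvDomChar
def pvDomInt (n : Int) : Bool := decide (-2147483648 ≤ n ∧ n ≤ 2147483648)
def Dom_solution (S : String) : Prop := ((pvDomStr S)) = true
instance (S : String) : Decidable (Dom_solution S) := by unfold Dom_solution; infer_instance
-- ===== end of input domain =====

-- B replaces A's enumerate-all-substrings-and-recheck-from-scratch search by a per-start
-- rightward scan that maintains the case sets incrementally (objective: faster).

-- ===== PORT A =====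
def lowerLetters : List Char := ['a','b','c','d','e','f','g','h','i','j','k','l','m','n','o','p','q','r','s','t','u','v','w','x','y','z']
def upperLetters : List Char := ['A','B','C','D','E','F','G','H','I','J','K','L','M','N','O','P','Q','R','S','T','U','V','W','X','Y','Z']

-- body of A's 'for letter in lower' loop; the 'none' arms are unreachable
-- (letter is always drawn from 'lower' and pos < 26, so Python never raises here)
def pairElim (temp : List Char) (letter : Char) : List Char :=
  if PySem.Chars.isIn [letter] temp then
    match (PySem.List.index? lowerLetters letter).bind
        (fun pos => PySem.List.pyGet? upperLetters (pos : Int)) with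
    | some u =>
        if PySem.Chars.isIn [u] temp then
          PySem.Chars.replace (PySem.Chars.replace temp [u] []) [letter] []
        else temp
    | none => temp
  else temp

def unbalancedCheck (el : List Char) : Int :=
  -- temp = "".join(set(el)) : only membership in temp and temp's final length are
  -- used, so Python's (unmodelled) set iteration order cannot affect the result;
  -- we take the set in first-insertion order.
  let temp := PySem.Set.ofList el
  let temp := lowerLetters.foldl pairElim temp
  if temp.length ≠ 0 then -1 else 1

def solution (S : String) : Int :=
  let s := S.toList
  let n : Int := PySem.List.len s
  let smallest : Int := n + 1
  let substrings := (PySem.List.pyRange 0 n 1).flatMap (fun i =>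
    (PySem.List.pyRange (i + 1) (n + 1) 1).map (fun j => PySem.List.slice s (some i) (some j)))
  let smallest := substrings.foldl (fun sm el =>
    if unbalancedCheck el = 1 then
      (if (el.length : Int) < sm then (el.length : Int) else sm)
    else sm) smallest
  if smallest = n + 1 then -1 else smallest

-- ===== PORT B =====
def altStep (st : PySem.Set Char × PySem.Set Char × Bool × Int × Int) (c : Char) :
    PySem.Set Char × PySem.Set Char × Bool × Int × Int :=
  let (lo, up, ok, L, sm) := st
  let L := L + 1
  let (lo, up, ok) :=
    if 'a' ≤ c ∧ c ≤ 'z' then (PySem.Set.add lo (PySem.Chars.upperChar c), up, ok)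
    else if 'A' ≤ c ∧ c ≤ 'Z' then (lo, PySem.Set.add up c, ok)
    else (lo, up, false)
  let sm := if ok ∧ PySem.Set.equal lo up ∧ L < sm then L else sm
  (lo, up, ok, L, sm)

def solution_alt (S : String) : Int :=
  let s := S.toList
  let n : Int := PySem.List.len s
  let smallest : Int := (PySem.List.pyRange 0 n 1).foldl
    (fun sm i =>
      ((PySem.List.slice s (some i) none).foldl altStep
        (PySem.Set.empty, PySem.Set.empty, true, 0, sm)).2.2.2.2)
    (n + 1)
  if smallest = n + 1 then -1 else smallest

-- ===== PRECONDITION & SPEC =====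
def Spec_solution (S : String) (out : Int) : Prop := out = solution_alt S
instance (S : String) (out : Int) : Decidable (Spec_solution S out) := by unfold Spec_solution; infer_instance

-- ===== CLAIM (what is proved, stated in full; the proofs are below) =====
def Claim_equal_solution : Prop := ∀ (S : String), Dom_solution S → Spec_solution S (solution S)

-- ===== LEMMAS AND PROOFS =====

-- the balance predicate both programs decide, and the running state of B's inner loop
def isLowC (c : Char) : Bool := decide ('a' ≤ c ∧ c ≤ 'z')
def isUpC (c : Char) : Bool := decide ('A' ≤ c ∧ c ≤ 'Z')
def isLetC (c : Char) : Bool := isLowC c || isUpC c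
def loSet (u : List Char) : PySem.Set Char :=
  PySem.Set.ofList ((u.filter isLowC).map PySem.Chars.upperChar)
def upSet (u : List Char) : PySem.Set Char := PySem.Set.ofList (u.filter isUpC)
def bal (u : List Char) : Bool := u.all isLetC && PySem.Set.equal (loSet u) (upSet u)
def upd (el : List Char) (sm : Int) : Int :=
  if bal el = true ∧ (el.length : Int) < sm then (el.length : Int) else sm
def stB (w : List Char) (sm : Int) : PySem.Set Char × PySem.Set Char × Bool × Int × Int :=
  (loSet w, upSet w, w.all isLetC, (w.length : Int), sm)

-- ---- character facts ----
lemma mem_lower_iff (c : Char) : c ∈ lowerLetters ↔ isLowC c = true := by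
  constructor
  · intro h; fin_cases h <;> decide
  · intro h
    simp only [isLowC, decide_eq_true_eq] at h
    have h1 : 97 ≤ c.toNat := h.1
    have h2 : c.toNat ≤ 122 := h.2
    have hc : Char.ofNat c.toNat = c := Char.ofNat_toNat c
    rw [← hc]
    interval_cases h : c.toNat <;> decide
lemma mem_upper_iff (c : Char) : c ∈ upperLetters ↔ isUpC c = true := by
  constructor
  · intro h; fin_cases h <;> decide
  · intro h
    simp only [isUpC, decide_eq_true_eq] at h
    have h1 : 65 ≤ c.toNat := h.1
    have h2 : c.toNat ≤ 90 := h.2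
    have hc : Char.ofNat c.toNat = c := Char.ofNat_toNat c
    rw [← hc]
    interval_cases h : c.toNat <;> decide
lemma not_low_and_up (c : Char) : ¬ (isLowC c = true ∧ isUpC c = true) := by
  rintro ⟨h1, h2⟩
  simp only [isLowC, isUpC, decide_eq_true_eq] at h1 h2
  have a1 : 97 ≤ c.toNat := h1.1
  have a2 : c.toNat ≤ 90 := h2.2
  omega
lemma upper_of_lower (l : Char) (h : l ∈ lowerLetters) :
    PySem.Chars.upperChar l ∈ upperLetters := by fin_cases h <;> decide
lemma lower_ne_upperChar (a b : Char) (ha : a ∈ lowerLetters) (hb : b ∈ lowerLetters) :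
    a ≠ PySem.Chars.upperChar b := by
  fin_cases ha <;> (fin_cases hb <;> decide)
lemma upperChar_inj (a b : Char) (ha : a ∈ lowerLetters) (hb : b ∈ lowerLetters)
    (h : PySem.Chars.upperChar a = PySem.Chars.upperChar b) : a = b := by
  revert h; fin_cases ha <;> (fin_cases hb <;> decide)
lemma upper_surj (c : Char) (h : c ∈ upperLetters) :
    ∃ l ∈ lowerLetters, PySem.Chars.upperChar l = c := by
  refine ⟨PySem.Chars.lowerChar c, ?_, ?_⟩ <;> (fin_cases h <;> decide)
lemma idx_upper (l : Char) (h : l ∈ lowerLetters) :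
    (PySem.List.index? lowerLetters l).bind
      (fun pos => PySem.List.pyGet? upperLetters (pos : Int)) = some (PySem.Chars.upperChar l) := by
  fin_cases h <;> decide

-- ---- A-side: replace with a single-char pattern deletes that character ----
lemma replace_go_single (c : Char) :
    ∀ (fuel : Nat) (l acc : List Char), l.length ≤ fuel →
      PySem.Chars.replace.go [c] [] fuel l acc = acc.reverse ++ l.filter (fun x => x ≠ c) := by
  intro fuel
  induction fuel with
  | zero =>
    intro l acc h
    have : l = [] := List.eq_nil_of_length_eq_zero (Nat.le_zero.mp h)
    subst this
    simp [PySem.Chars.replace.go]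
  | succ n ih =>
    intro l acc h
    cases l with
    | nil => simp [PySem.Chars.replace.go]
    | cons c' t =>
      simp only [PySem.Chars.replace.go]
      by_cases hc : c = c'
      · subst hc
        have hp : List.isPrefixOf [c] (c :: t) = true := by simp [List.isPrefixOf]
        rw [if_pos hp]
        simp only [List.length_cons] at h
        rw [ih _ _ (by simpa using Nat.le_of_succ_le_succ h)]
        simp
      · have hp : List.isPrefixOf [c] (c' :: t) = false := by
          simp [List.isPrefixOf]; exact fun h' => hc h'
        rw [if_neg (by simp [hp])]
        simp only [List.length_cons] at h
        rw [ih _ _ (Nat.le_of_succ_le_succ h)]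
        simp [Ne.symm hc]

lemma replace_single (t : List Char) (c : Char) :
    PySem.Chars.replace t [c] [] = t.filter (fun x => x ≠ c) := by
  simp only [PySem.Chars.replace]
  rw [if_neg (by simp)]
  simpa using replace_go_single c t.length t [] le_rfl

lemma isIn_single (c : Char) (t : List Char) : PySem.Chars.isIn [c] t = true ↔ c ∈ t := by
  rw [PySem.Chars.isIn_iff_infix, List.singleton_infix_iff]

lemma pairElim_eq (temp : List Char) (l : Char) (hl : l ∈ lowerLetters) :
    pairElim temp l =
      if l ∈ temp ∧ PySem.Chars.upperChar l ∈ temp then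
        (temp.filter (fun x => x ≠ PySem.Chars.upperChar l)).filter (fun x => x ≠ l)
      else temp := by
  simp only [pairElim, idx_upper l hl]
  by_cases h1 : l ∈ temp
  · rw [if_pos ((isIn_single l temp).mpr h1)]
    by_cases h2 : PySem.Chars.upperChar l ∈ temp
    · rw [if_pos ((isIn_single _ _).mpr h2), if_pos ⟨h1, h2⟩, replace_single, replace_single]
    · rw [if_neg (fun hc => h2 ((isIn_single _ _).mp hc)), if_neg (fun hc => h2 hc.2)]
  · rw [if_neg (fun hc => h1 ((isIn_single _ _).mp hc)), if_neg (fun hc => h1 hc.1)]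

lemma foldl_pairElim (Q : List Char) (hQ : Q.Nodup) (hsub : ∀ l ∈ Q, l ∈ lowerLetters) :
    ∀ temp : List Char,
      Q.foldl pairElim temp = temp.filter (fun x =>
        ! Q.any (fun l => (x == l || x == PySem.Chars.upperChar l)
          && temp.contains l && temp.contains (PySem.Chars.upperChar l))) := by
  induction Q with
  | nil => intro temp; simp
  | cons l Q' ih =>
    intro temp
    have hl : l ∈ lowerLetters := hsub l List.mem_cons_self
    have hnd : l ∉ Q' := (List.nodup_cons.mp hQ).1
    have hQ' : Q'.Nodup := (List.nodup_cons.mp hQ).2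
    have hsub' : ∀ x ∈ Q', x ∈ lowerLetters := fun x hx => hsub x (List.mem_cons_of_mem _ hx)
    simp only [List.foldl_cons]
    rw [pairElim_eq temp l hl]
    by_cases hb : l ∈ temp ∧ PySem.Chars.upperChar l ∈ temp
    · rw [if_pos hb, List.filter_filter, ih hQ' hsub' _, List.filter_filter]
      apply List.filter_congr
      intro x hx
      have hcont : ∀ l1 ∈ Q',
          ((List.filter (fun a => decide (a ≠ l) && decide (a ≠ PySem.Chars.upperChar l)) temp).contains l1
              = temp.contains l1)
          ∧ ((List.filter (fun a => decide (a ≠ l) && decide (a ≠ PySem.Chars.upperChar l)) temp).contains (PySem.Chars.upperChar l1)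
              = temp.contains (PySem.Chars.upperChar l1)) := by
        intro l1 h1
        have hll : l1 ∈ lowerLetters := hsub' l1 h1
        have h2 : l1 ≠ l := fun e => hnd (e ▸ h1)
        have h3 : l1 ≠ PySem.Chars.upperChar l := lower_ne_upperChar l1 l hll hl
        have h4 : PySem.Chars.upperChar l1 ≠ l := (lower_ne_upperChar l l1 hl hll).symm
        have h5 : PySem.Chars.upperChar l1 ≠ PySem.Chars.upperChar l :=
          fun e => h2 (upperChar_inj l1 l hll hl e)
        constructor <;> simp [List.contains_eq_mem, List.mem_filter, h2, h3, h4, h5]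
      have hany : (Q'.any fun l1 => (x == l1 || x == PySem.Chars.upperChar l1)
              && (List.filter (fun a => decide (a ≠ l) && decide (a ≠ PySem.Chars.upperChar l)) temp).contains l1
              && (List.filter (fun a => decide (a ≠ l) && decide (a ≠ PySem.Chars.upperChar l)) temp).contains (PySem.Chars.upperChar l1))
          = (Q'.any fun l1 => (x == l1 || x == PySem.Chars.upperChar l1)
              && temp.contains l1 && temp.contains (PySem.Chars.upperChar l1)) := by
        apply Bool.eq_iff_iff.mpr
        simp only [List.any_eq_true]
        constructor
        · rintro ⟨l1, h1, hp⟩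
          exact ⟨l1, h1, by rwa [(hcont l1 h1).1, (hcont l1 h1).2] at hp⟩
        · rintro ⟨l1, h1, hp⟩
          exact ⟨l1, h1, by rwa [(hcont l1 h1).1, (hcont l1 h1).2]⟩
      rw [hany, List.any_cons]
      have c1 : temp.contains l = true := by simp [List.contains_eq_mem, hb.1]
      have c2 : temp.contains (PySem.Chars.upperChar l) = true := by simp [List.contains_eq_mem, hb.2]
      simp only [c1, c2, Bool.and_true, Bool.not_or]
      have e1 : decide (x ≠ l) = !(x == l) := by
        by_cases h : x = l <;> simp [h]
      have e2 : decide (x ≠ PySem.Chars.upperChar l) = !(x == PySem.Chars.upperChar l) := by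
        by_cases h : x = PySem.Chars.upperChar l <;> simp [h]
      rw [e1, e2, Bool.and_comm, Bool.and_assoc]
    · rw [if_neg hb, ih hQ' hsub' temp]
      apply List.filter_congr
      intro x hx
      rw [List.any_cons]
      have : (temp.contains l && temp.contains (PySem.Chars.upperChar l)) = false := by
        rcases Decidable.not_and_iff_not_or_not.mp hb with h | h <;>
          simp [List.contains_eq_mem, h]
      have hcond : ((x == l || x == PySem.Chars.upperChar l) && temp.contains l
          && temp.contains (PySem.Chars.upperChar l)) = false := by
        rw [Bool.and_assoc, this, Bool.and_false]
      rw [hcond, Bool.false_or]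

lemma empty_iff_bal (el : List Char) :
    (∀ x ∈ el, ∃ l ∈ lowerLetters, (x = l ∨ x = PySem.Chars.upperChar l)
        ∧ l ∈ el ∧ PySem.Chars.upperChar l ∈ el) ↔ bal el = true := by
  constructor
  · intro H
    simp only [bal, Bool.and_eq_true, List.all_eq_true]
    constructor
    · intro x hx
      obtain ⟨l, hlL, hor, hle, hue⟩ := H x hx
      rcases hor with rfl | rfl
      · have := (mem_lower_iff _).mp hlL
        simp [isLetC, this]
      · have := (mem_upper_iff _).mp (upper_of_lower l hlL)
        simp [isLetC, this]
    · rw [PySem.Set.equal_iff]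
      intro y
      simp only [loSet, upSet, PySem.Set.mem_ofList, List.mem_map, List.mem_filter]
      constructor
      · rintro ⟨c, ⟨hc, hlow⟩, rfl⟩
        obtain ⟨l, hlL, hor, hle, hue⟩ := H c hc
        have hup : isUpC (PySem.Chars.upperChar l) = true :=
          (mem_upper_iff _).mp (upper_of_lower l hlL)
        have hcl_eq : c = l := by
          rcases hor with h | h
          · exact h
          · exact absurd ⟨h ▸ hlow, hup⟩ (not_low_and_up _)
        subst hcl_eq
        exact ⟨hue, hup⟩
      · rintro ⟨hy, hyup⟩
        obtain ⟨l, hlL, hor, hle, hue⟩ := H y hy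
        have hyeq : y = PySem.Chars.upperChar l := by
          rcases hor with h | h
          · exact absurd ⟨h ▸ (mem_lower_iff l).mp hlL, hyup⟩ (not_low_and_up _)
          · exact h
        exact ⟨l, ⟨hle, (mem_lower_iff l).mp hlL⟩, hyeq.symm⟩
  · intro hbal
    simp only [bal, Bool.and_eq_true, List.all_eq_true] at hbal
    obtain ⟨hall, heq⟩ := hbal
    rw [PySem.Set.equal_iff] at heq
    intro x hx
    have hlet := hall x hx
    simp only [isLetC, Bool.or_eq_true] at hlet
    rcases hlet with hlow | hup
    · refine ⟨x, (mem_lower_iff x).mpr hlow, Or.inl rfl, hx, ?_⟩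
      have hmem : PySem.Chars.upperChar x ∈ loSet el := by
        simp only [loSet, PySem.Set.mem_ofList, List.mem_map, List.mem_filter]
        exact ⟨x, ⟨hx, hlow⟩, rfl⟩
      have := (heq _).mp hmem
      simp only [upSet, PySem.Set.mem_ofList, List.mem_filter] at this
      exact this.1
    · obtain ⟨l, hlL, hUl⟩ := upper_surj x ((mem_upper_iff x).mpr hup)
      refine ⟨l, hlL, Or.inr hUl.symm, ?_, hUl ▸ hx⟩
      have hxu : x ∈ upSet el := by
        simp only [upSet, PySem.Set.mem_ofList, List.mem_filter]
        exact ⟨hx, hup⟩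
      have := (heq x).mpr hxu
      simp only [loSet, PySem.Set.mem_ofList, List.mem_map, List.mem_filter] at this
      obtain ⟨c, ⟨hce, hcl⟩, hcx⟩ := this
      have hc : c = l := upperChar_inj c l ((mem_lower_iff c).mpr hcl) hlL (by rw [hcx, hUl])
      exact hc ▸ hce

lemma ub_eq (el : List Char) : unbalancedCheck el = if bal el then 1 else -1 := by
  have h1 := foldl_pairElim lowerLetters (by decide) (fun l h => h) (PySem.Set.ofList el)
  by_cases hb : bal el = true
  · have hlen0 : (List.foldl pairElim (PySem.Set.ofList el) lowerLetters).length = 0 := by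
      rw [h1, List.length_eq_zero_iff]
      apply List.filter_eq_nil_iff.mpr
      intro x hxT
      have hx : x ∈ el := (PySem.Set.mem_ofList el x).mp hxT
      obtain ⟨l, hlL, hor, hle, hue⟩ := (empty_iff_bal el).mpr hb x hx
      simp only [Bool.not_eq_true', Bool.not_eq_false]
      apply List.any_eq_true.mpr
      refine ⟨l, hlL, ?_⟩
      have cb : (x == l || x == PySem.Chars.upperChar l) = true := by
        rcases hor with rfl | rfl <;> simp
      have d1 : List.contains (PySem.Set.ofList el) l = true := by
        simp [List.contains_eq_mem, PySem.Set.mem_ofList, hle]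
      have d2 : List.contains (PySem.Set.ofList el) (PySem.Chars.upperChar l) = true := by
        simp [List.contains_eq_mem, PySem.Set.mem_ofList, hue]
      rw [cb, d1, d2]
      rfl
    simp [unbalancedCheck, hlen0, hb]
  · have hne : ¬ ∀ x ∈ el, ∃ l ∈ lowerLetters, (x = l ∨ x = PySem.Chars.upperChar l)
        ∧ l ∈ el ∧ PySem.Chars.upperChar l ∈ el := fun H => hb ((empty_iff_bal el).mp H)
    push_neg at hne
    obtain ⟨x, hx, hnx⟩ := hne
    have hlen : (List.foldl pairElim (PySem.Set.ofList el) lowerLetters).length ≠ 0 := by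
      rw [h1]
      intro h0
      rw [List.length_eq_zero_iff] at h0
      have hmem : x ∈ (List.filter (fun x =>
          ! lowerLetters.any (fun l => (x == l || x == PySem.Chars.upperChar l)
            && List.contains (PySem.Set.ofList el) l
            && List.contains (PySem.Set.ofList el) (PySem.Chars.upperChar l))) (PySem.Set.ofList el)) := by
        apply List.mem_filter.mpr
        refine ⟨(PySem.Set.mem_ofList el x).mpr hx, ?_⟩
        simp only [Bool.not_eq_true']
        apply List.any_eq_false.mpr
        intro l hlL
        by_cases h1' : (x == l || x == PySem.Chars.upperChar l) = true
        · have hor : x = l ∨ x = PySem.Chars.upperChar l := by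
            rcases Bool.or_eq_true_iff.mp h1' with h | h
            · exact Or.inl (beq_iff_eq.mp h)
            · exact Or.inr (beq_iff_eq.mp h)
          by_cases h2 : l ∈ el ∧ PySem.Chars.upperChar l ∈ el
          · exact absurd h2.2 (hnx l hlL hor h2.1)
          · rcases Decidable.not_and_iff_not_or_not.mp h2 with h | h <;>
              simp [List.contains_eq_mem, PySem.Set.mem_ofList, h]
        · simp only [Bool.not_eq_true] at h1'
          rw [h1']
          simp
      exact List.ne_nil_of_mem hmem h0
    simp [unbalancedCheck, hlen, hb]

lemma bodyA_eq (el : List Char) (sm : Int) :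
    (if unbalancedCheck el = 1 then
      (if (el.length : Int) < sm then (el.length : Int) else sm) else sm) = upd el sm := by
  rw [ub_eq]
  unfold upd
  by_cases hb : bal el = true <;> simp [hb]

-- ---- B-side ----
lemma altStep_stB (w : List Char) (sm : Int) (c : Char) :
    altStep (stB w sm) c = stB (w ++ [c]) (upd (w ++ [c]) sm) := by
  have hlen : (((w ++ [c]).length : Nat) : Int) = (w.length : Int) + 1 := by
    simp [List.length_append]
  by_cases hlow : 'a' ≤ c ∧ c ≤ 'z'
  · have hbl : isLowC c = true := by simp [isLowC, hlow]
    have hbu : isUpC c = false := by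
      by_contra h
      exact not_low_and_up c ⟨hbl, by simpa using h⟩
    have hlo : loSet (w ++ [c]) = PySem.Set.add (loSet w) (PySem.Chars.upperChar c) := by
      simp [loSet, List.filter_append, hbl, PySem.Set.ofList_append_singleton]
    have hup : upSet (w ++ [c]) = upSet w := by
      simp [upSet, List.filter_append, hbu]
    have hall : (w ++ [c]).all isLetC = w.all isLetC := by
      simp [List.all_append, isLetC, hbl]
    simp only [altStep, stB, if_pos hlow, hlo, hup, hall, hlen, upd, bal]
    refine congrArg _ (congrArg _ (congrArg _ (congrArg _ ?_)))
    exact if_congr (by simp [Bool.and_eq_true, and_assoc]) rfl rfl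
  · by_cases hupc : 'A' ≤ c ∧ c ≤ 'Z'
    · have hbu : isUpC c = true := by simp [isUpC, hupc]
      have hbl : isLowC c = false := by
        by_contra h
        exact not_low_and_up c ⟨by simpa using h, hbu⟩
      have hlo : loSet (w ++ [c]) = loSet w := by
        simp [loSet, List.filter_append, hbl]
      have hup : upSet (w ++ [c]) = PySem.Set.add (upSet w) c := by
        simp [upSet, List.filter_append, hbu, PySem.Set.ofList_append_singleton]
      have hall : (w ++ [c]).all isLetC = w.all isLetC := by
        simp [List.all_append, isLetC, hbl, hbu]
      simp only [altStep, stB, if_neg hlow, if_pos hupc, hlo, hup, hall, hlen, upd, bal]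
      refine congrArg _ (congrArg _ (congrArg _ (congrArg _ ?_)))
      exact if_congr (by simp [Bool.and_eq_true, and_assoc]) rfl rfl
    · have hbu : isUpC c = false := by
        simp only [isUpC, decide_eq_false_iff_not]
        exact hupc
      have hbl : isLowC c = false := by
        simp only [isLowC, decide_eq_false_iff_not]
        exact hlow
      have hlo : loSet (w ++ [c]) = loSet w := by
        simp [loSet, List.filter_append, hbl]
      have hup : upSet (w ++ [c]) = upSet w := by
        simp [upSet, List.filter_append, hbu]
      have hall : (w ++ [c]).all isLetC = false := by
        simp [List.all_append, isLetC, hbl, hbu]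
      simp only [altStep, stB, if_neg hlow, if_neg hupc, hlo, hup, hall, hlen, upd, bal]
      refine congrArg _ (congrArg _ (congrArg _ (congrArg _ ?_)))
      exact if_congr (by simp) rfl rfl

lemma foldl_altStep (v : List Char) : ∀ (w : List Char) (sm : Int),
    v.foldl altStep (stB w sm) =
      stB (w ++ v) ((List.range v.length).foldl (fun sm k => upd (w ++ v.take (k + 1)) sm) sm) := by
  induction v with
  | nil => intro w sm; simp
  | cons c v' ih =>
    intro w sm
    rw [List.foldl_cons, altStep_stB, ih (w ++ [c]) (upd (w ++ [c]) sm)]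
    have h1 : (w ++ [c]) ++ v' = w ++ c :: v' := by simp
    have h2 : (List.range (c :: v').length).foldl
        (fun sm k => upd (w ++ (c :: v').take (k + 1)) sm) sm
      = (List.range v'.length).foldl
        (fun sm k => upd ((w ++ [c]) ++ v'.take (k + 1)) sm) (upd (w ++ [c]) sm) := by
      rw [List.length_cons, List.range_succ_eq_map, List.foldl_cons, List.foldl_map]
      have h0 : w ++ (c :: v').take (0 + 1) = w ++ [c] := by simp
      rw [h0]
      apply PySem.List.foldl_congr_mem
      intro acc k hk
      have : w ++ (c :: v').take (k.succ + 1) = (w ++ [c]) ++ v'.take (k + 1) := by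
        simp [List.take_succ_cons]
      rw [this]
    rw [h1, h2]

-- ---- assembling both sides ----
lemma A_inner (s : List Char) (i₀ : Nat) (sm : Int) :
    (PySem.List.pyRange ((i₀ : Int) + 1) ((s.length : Int) + 1) 1).foldl
      (fun sm j => upd (PySem.List.slice s (some (i₀ : Int)) (some j)) sm) sm
    = (List.range (s.length - i₀)).foldl (fun sm k => upd ((s.drop i₀).take (k + 1)) sm) sm := by
  rw [PySem.List.pyRange_one]
  have hco : (((s.length : Int) + 1) - ((i₀ : Int) + 1)).toNat = s.length - i₀ := by omega
  rw [hco, List.foldl_map]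
  apply PySem.List.foldl_congr_mem
  intro acc k hk
  have hcast : ((i₀ : Int) + 1 + (k : Int)) = (i₀ : Int) + ((k + 1 : Nat) : Int) := by
    push_cast; ring
  rw [hcast, PySem.List.slice_natCast_add]

lemma main_eq (s : List Char) :
    ((PySem.List.pyRange 0 (s.length : Int) 1).flatMap (fun i =>
        (PySem.List.pyRange (i + 1) ((s.length : Int) + 1) 1).map
          (fun j => PySem.List.slice s (some i) (some j)))).foldl
        (fun sm el => if unbalancedCheck el = 1 then
            (if (el.length : Int) < sm then (el.length : Int) else sm) else sm)
        ((s.length : Int) + 1)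
    = (PySem.List.pyRange 0 (s.length : Int) 1).foldl
        (fun sm i => ((PySem.List.slice s (some i) none).foldl altStep
          (PySem.Set.empty, PySem.Set.empty, true, 0, sm)).2.2.2.2)
        ((s.length : Int) + 1) := by
  rw [List.foldl_flatMap]
  apply PySem.List.foldl_congr_mem
  intro sm i hi
  obtain ⟨h0i, hin⟩ := PySem.List.mem_pyRange_one.mp hi
  obtain ⟨i₀, rfl⟩ : ∃ i₀ : Nat, i = (i₀ : Int) := ⟨i.toNat, by omega⟩
  rw [List.foldl_map]
  have hbody : ∀ (acc : Int), ∀ j ∈ PySem.List.pyRange ((i₀ : Int) + 1) ((s.length : Int) + 1) 1,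
      (if unbalancedCheck (PySem.List.slice s (some (i₀ : Int)) (some j)) = 1 then
        (if ((PySem.List.slice s (some (i₀ : Int)) (some j)).length : Int) < acc then
          ((PySem.List.slice s (some (i₀ : Int)) (some j)).length : Int) else acc) else acc)
      = upd (PySem.List.slice s (some (i₀ : Int)) (some j)) acc :=
    fun acc j _ => bodyA_eq _ acc
  rw [PySem.List.foldl_congr_mem _ _ _ _ hbody, A_inner]
  have hinit : ((PySem.Set.empty, PySem.Set.empty, true, 0, sm) :
      PySem.Set Char × PySem.Set Char × Bool × Int × Int) = stB [] sm := rfl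
  rw [PySem.List.slice_from_natCast, hinit, foldl_altStep]
  simp only [stB, List.nil_append, List.length_drop]

-- ===== VERDICT (by name: the statement is the Claim_ definition above) =====
theorem solution_spec : Claim_equal_solution := by
  intro S _
  unfold Spec_solution
  simp only [solution, solution_alt, PySem.List.len_eq]
  rw [main_eq]
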